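-- pv_equiv track=rewrite | github.com/minarefaat1002/leetcode-solutions | 1451-rearrange-words-in-a-sentence/1451-rearrange-words-in-a-sentence.py | arrangeWords
-- ===== SOURCE A (Python) =====
-- def arrangeWords(text: str) -> str:
--     words = text.split(" ")
--     arr = []
--     count = 0
--     for word in words:
--         arr.append([len(word),count,word.lower()])
--         count += 1
--     res = sorted(arr, key = lambda x: (x[0], x[1]))
--     res[0][2] = res[0][2][0].upper() + res[0][2][1:]
--     ans = ""
--     for i,ele in enumerate(res):
--         ans += ele[2] + (" "  if i < len(res)-1 else "")
--     return ans
-- ===== SOURCE B (Python) =====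
-- def arrangeWords(text: str) -> str:
--     buckets = {}
--     for w in text.split(" "):
--         buckets.setdefault(len(w), []).append(w.lower())
--     out = []
--     for length in sorted(buckets):
--         out.extend(buckets[length])
--     out[0] = out[0][0].upper() + out[0][1:]
--     return " ".join(out)
-- ===== Notes on version B (the rewrite author's own statement) =====
-- stated objective: alternative
-- what changed: B replaces A's stable sort of (length, index, word) triples by a dict of length-keyed buckets built in one pass and concatenated in sorted-key order, and joins with ' '.join instead of an enumerate loop with a conditional trailing space.
-- outside the precondition, e.g. on arrangeWords(''): A raises IndexError, B raises IndexError; on arrangeWords(' '): A raises IndexError, B raises IndexError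
import Mathlib
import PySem

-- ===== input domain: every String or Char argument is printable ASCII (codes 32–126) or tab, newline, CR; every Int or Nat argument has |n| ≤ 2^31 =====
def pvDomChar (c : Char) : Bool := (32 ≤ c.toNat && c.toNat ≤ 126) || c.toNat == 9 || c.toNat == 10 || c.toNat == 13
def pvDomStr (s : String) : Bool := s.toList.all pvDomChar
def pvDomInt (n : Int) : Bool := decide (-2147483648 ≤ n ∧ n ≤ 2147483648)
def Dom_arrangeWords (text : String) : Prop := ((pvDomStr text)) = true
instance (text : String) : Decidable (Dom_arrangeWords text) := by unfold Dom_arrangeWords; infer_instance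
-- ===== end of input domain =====

-- B groups the words into a length-keyed dict of buckets and concatenates the buckets in sorted
-- key order instead of stable-sorting (length, index) triples; equivalence of return values only.

-- ===== PORT A =====
def pvA_step (st : List (Int × Int × List Char) × Int) (w : List Char) :
    List (Int × Int × List Char) × Int :=
  (st.1 ++ [((w.length : Int), st.2, PySem.Chars.lower w)], st.2 + 1)

def pvA_key (x : Int × Int × List Char) : Int ×ₗ Int := toLex (x.1, x.2.1)

-- res[0][2][0].upper() + res[0][2][1:]; on [] Python raises IndexError (excluded by Pre_)
def pvA_cap (w : List Char) : List Char :=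
  match w with
  | [] => w
  | c :: cs => PySem.Chars.upper [c] ++ cs

def arrangeWords (text : String) : String :=
  let words := PySem.Chars.splitOn text.toList [' ']
  let arr := (List.foldl pvA_step ([], 0) words).1
  let res := PySem.List.sorted arr pvA_key
  let res2 : List (Int × Int × List Char) :=
    match res with
    | [] => []
    | t :: ts => (t.1, t.2.1, pvA_cap t.2.2) :: ts
  let ans := List.foldl
    (fun ans (p : Int × (Int × Int × List Char)) =>
      ans ++ p.2.2.2 ++ (if p.1 < (res2.length : Int) - 1 then [' '] else []))
    [] (PySem.List.enumerate res2)
  String.mk ans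

-- ===== PORT B =====
def pvB_step (d : PySem.Dict Int (List (List Char))) (w : List Char) :
    PySem.Dict Int (List (List Char)) :=
  d.modify ((w.length : Int)) [] (fun l => l ++ [PySem.Chars.lower w])

-- out[0][0].upper() + out[0][1:]; on [] Python raises IndexError (excluded by Pre_)
def pvB_cap (w : List Char) : List Char :=
  match w with
  | [] => w
  | c :: cs => PySem.Chars.upper [c] ++ cs

def arrangeWords_alt (text : String) : String :=
  let ws := PySem.Chars.splitOn text.toList [' ']
  let buckets := List.foldl pvB_step PySem.Dict.empty ws
  let out := List.foldl (fun acc k => acc ++ buckets.getD k [])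
    [] (PySem.List.sorted buckets.keys (fun k => k))
  let out2 :=
    match out with
    | [] => []
    | w :: rest => pvB_cap w :: rest
  String.mk (PySem.Chars.join [' '] out2)

-- ===== PRECONDITION & SPEC =====
-- Pre_ excludes exactly the inputs with an empty space-split token (empty text, leading/trailing
-- or doubled spaces): there the shortest word is "" and Python A raises IndexError on ""[0].
def Pre_arrangeWords (text : String) : Prop :=
  [] ∉ PySem.Chars.splitOn text.toList [' ']
instance (text : String) : Decidable (Pre_arrangeWords text) := by
  unfold Pre_arrangeWords; infer_instance

def pvWitness_arrangeWords : String := "ok a"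

def Spec_arrangeWords (text : String) (out : String) : Prop := out = arrangeWords_alt text
instance (text : String) (out : String) : Decidable (Spec_arrangeWords text out) := by
  unfold Spec_arrangeWords; infer_instance

-- ===== CLAIM (what is proved, stated in full; the proofs are below) =====
def Claim_equal_arrangeWords : Prop :=
  ∀ (text : String), Dom_arrangeWords text → Pre_arrangeWords text →
    Spec_arrangeWords text (arrangeWords text)

-- ===== LEMMAS AND PROOFS =====

-- A's first loop builds the (length, index, lowered word) triples: it is zipIdx mapped.
theorem pvFoldA (ws : List (List Char)) (acc : List (Int × Int × List Char)) (k : Nat) :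
    (List.foldl pvA_step (acc, (k : Int)) ws).1
      = acc ++ (ws.zipIdx k).map
          (fun p => ((p.1.length : Int), (p.2 : Int), PySem.Chars.lower p.1)) := by
  induction ws generalizing acc k with
  | nil => simp
  | cons a t ih =>
    simp only [List.foldl_cons, List.zipIdx_cons, List.map_cons, pvA_step]
    have h := ih (acc ++ [((a.length : Int), (k : Int), PySem.Chars.lower a)]) (k + 1)
    push_cast at h ⊢
    rw [h]
    simp

-- indices in zipIdx are strictly increasing
theorem pvZipIdxPairwise {α : Type} (l : List α) (k : Nat) :
    List.Pairwise (fun p q : α × Nat => p.2 < q.2) (l.zipIdx k) := by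
  induction l generalizing k with
  | nil => simp
  | cons a t ih =>
    simp only [List.zipIdx_cons]
    refine List.Pairwise.cons ?_ (ih (k + 1))
    rintro ⟨x, i⟩ hq
    have := List.mem_zipIdx hq
    simp only
    omega

-- filtering/projecting a zipIdx back to the plain list
theorem pvZipFilterMap {α β : Type} (l : List α) (k : Nat) (P : α → Bool) (h : α → β) :
    ((l.zipIdx k).filter (fun p => P p.1)).map (fun p => h p.1) = (l.filter P).map h := by
  induction l generalizing k with
  | nil => simp
  | cons a t ih =>
    by_cases hP : P a <;> simp [hP, ih (k + 1)]

-- partition of a list into per-key filters, keys listed without duplicates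
theorem pvPermFlatMapFilter {α κ : Type} [BEq κ] [LawfulBEq κ] (ks : List κ) (f : α → κ) :
    ∀ (l : List α), ks.Nodup → (∀ x ∈ l, f x ∈ ks) →
      (ks.flatMap (fun k => l.filter (fun x => f x == k))).Perm l := by
  induction ks with
  | nil =>
    intro l _ hall
    cases l with
    | nil => simp
    | cons a t => exact absurd (hall a (by simp)) (by simp)
  | cons k ks ih =>
    intro l hnd hall
    simp only [List.flatMap_cons]
    have hne : ∀ k' ∈ ks, k' ≠ k := by
      intro k' hk' h
      exact (List.nodup_cons.mp hnd).1 (h ▸ hk')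
    have hrw : ks.map (fun k' => l.filter (fun x => f x == k'))
        = ks.map (fun k' => (l.filter (fun x => !(f x == k))).filter (fun x => f x == k')) := by
      apply List.map_congr_left
      intro k' hk'
      rw [List.filter_filter]
      apply List.filter_congr
      intro x _
      by_cases hx : f x = k'
      · simp only [hx, beq_self_eq_true, Bool.true_and]
        simp [hne k' hk']
      · simp [hx]
    rw [List.flatMap, hrw, ← List.flatMap]
    have hperm := ih (l.filter (fun x => !(f x == k))) (List.nodup_cons.mp hnd).2 ?_
    · exact (hperm.append_left (l.filter (fun x => f x == k))).trans
        (List.filter_append_perm _ l)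
    · intro x hx
      have hm := List.mem_filter.mp hx
      have hall' := hall x hm.1
      have : ¬ (f x == k) = true := by simpa using hm.2
      rcases List.mem_cons.mp hall' with h | h
      · exact absurd (by simp [h]) this
      · exact h

-- the trailing-space fold over enumerate is join with single spaces
theorem pvJoinFold (l : List (Int × Int × List Char)) (N : Int) :
    ∀ (n : Int) (acc : List Char), n + l.length = N →
      List.foldl
        (fun ans (p : Int × (Int × Int × List Char)) =>
          ans ++ p.2.2.2 ++ (if p.1 < N - 1 then [' '] else []))
        acc (PySem.List.enumerate l n)
      = acc ++ PySem.Chars.join [' '] (l.map (fun t => t.2.2)) := by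
  induction l with
  | nil => intro n acc h; simp [PySem.List.enumerate, PySem.Chars.join_nil]
  | cons a t ih =>
    intro n acc h
    cases t with
    | nil =>
      have hn : ¬ (n < N - 1) := by simp at h; omega
      simp [PySem.List.enumerate, PySem.Chars.join_singleton, hn]
    | cons b t' =>
      have hlt : n < N - 1 := by
        simp only [List.length_cons] at h; push_cast at h; omega
      have hrec := ih (n + 1) (acc ++ a.2.2 ++ [' ']) (by
        simp only [List.length_cons] at h ⊢; push_cast at h ⊢; omega)
      simp only [PySem.List.enumerate] at hrec ⊢
      simp only [List.foldl_cons, if_pos hlt, hrec, List.map_cons,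
        PySem.Chars.join_cons_cons]
      simp [List.append_assoc]

-- === the core equality, stated over the split word list ===
theorem pvMain (ws : List (List Char)) :
    List.foldl
      (fun ans (p : Int × (Int × Int × List Char)) =>
        ans ++ p.2.2.2 ++
          (if p.1 < ((match PySem.List.sorted (List.foldl pvA_step ([], 0) ws).1 pvA_key with
              | [] => []
              | t :: ts => (t.1, t.2.1, pvA_cap t.2.2) :: ts : List (Int × Int × List Char)).length : Int) - 1
            then [' '] else []))
      [] (PySem.List.enumerate
        (match PySem.List.sorted (List.foldl pvA_step ([], 0) ws).1 pvA_key with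
         | [] => []
         | t :: ts => (t.1, t.2.1, pvA_cap t.2.2) :: ts))
    = PySem.Chars.join [' ']
        (match List.foldl (fun acc k => acc ++ (List.foldl pvB_step PySem.Dict.empty ws).getD k [])
            [] (PySem.List.sorted (List.foldl pvB_step PySem.Dict.empty ws).keys (fun k => k)) with
         | [] => []
         | w :: rest => pvB_cap w :: rest) := by
  have harr : (List.foldl pvA_step ([], 0) ws).1
      = (ws.zipIdx).map (fun p => ((p.1.length : Int), (p.2 : Int), PySem.Chars.lower p.1)) := by
    simpa using pvFoldA ws [] 0
  set F : (List Char) × Nat → Int × Int × List Char :=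
    fun p => ((p.1.length : Int), (p.2 : Int), PySem.Chars.lower p.1) with hF
  set buckets := List.foldl pvB_step PySem.Dict.empty ws with hb
  have hkeys_mem : ∀ c, c ∈ buckets.keys ↔ c ∈ ws.map (fun w => (w.length : Int)) := by
    intro c
    rw [hb, show List.foldl pvB_step PySem.Dict.empty ws
        = List.foldl (fun d x => PySem.Dict.modify d ((fun (w : List Char) => (w.length : Int)) x)
            [] ((fun (_ : PySem.Dict Int (List (List Char))) (w : List Char)
                  (v : List (List Char)) => v ++ [PySem.Chars.lower w]) d x))
            PySem.Dict.empty ws from rfl,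
      PySem.Dict.keys_foldl_modify_key, PySem.Dict.keys_empty, PySem.Set.update_nil_left,
      PySem.Set.mem_ofList]
  have hnodup : buckets.keys.Nodup := by
    rw [hb, show List.foldl pvB_step PySem.Dict.empty ws
        = List.foldl (fun d x => PySem.Dict.modify d ((fun (w : List Char) => (w.length : Int)) x)
            [] ((fun (_ : PySem.Dict Int (List (List Char))) (w : List Char)
                  (v : List (List Char)) => v ++ [PySem.Chars.lower w]) d x))
            PySem.Dict.empty ws from rfl]
    exact PySem.Dict.nodup_keys_foldl_modify_key _ _ _ _ _ PySem.Dict.nodup_keys_empty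
  set KS := PySem.List.sorted buckets.keys (fun k => k) with hKS
  have hKSperm : KS.Perm buckets.keys := PySem.List.sorted_perm _ _ _
  have hKSnodup : KS.Nodup := hKSperm.nodup_iff.mpr hnodup
  have hKSlt : List.Pairwise (· < ·) KS := by
    have hle := PySem.List.sorted_pairwise buckets.keys (fun k => k)
    exact (hle.and hKSnodup).imp (fun h => lt_of_le_of_ne h.1 h.2)
  have hbucket : ∀ c, buckets.getD c []
      = (ws.filter (fun w => (w.length : Int) == c)).map PySem.Chars.lower := by
    intro c
    have hfm : List.foldl pvB_step PySem.Dict.empty ws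
        = List.foldl (fun (d : PySem.Dict Int (List (List Char))) (p : Int × List Char) =>
            d.modify p.1 [] (fun x => x ++ [p.2])) PySem.Dict.empty
            (ws.map (fun w => ((w.length : Int), PySem.Chars.lower w))) := by
      rw [List.foldl_map]
      rfl
    rw [hb, hfm, PySem.Dict.getD_foldl_modify_append, PySem.Dict.getD_empty, List.nil_append,
      List.filter_map, List.map_map]
    rfl
  have hsort : PySem.List.sorted ((ws.zipIdx).map F) pvA_key
      = KS.flatMap (fun c => ((ws.zipIdx).map F).filter (fun t => t.1 == c)) := by
    apply PySem.List.sorted_eq_of_perm_of_pairwise_lt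
    · refine pvPermFlatMapFilter KS (fun (t : Int × Int × List Char) => t.1) _ hKSnodup ?_
      intro x hx
      obtain ⟨p, hp, rfl⟩ := List.mem_map.mp hx
      have hw : p.1 ∈ ws := List.fst_mem_of_mem_zipIdx hp
      rw [hKSperm.mem_iff, hkeys_mem]
      exact List.mem_map_of_mem hw
    · rw [List.pairwise_flatMap]
      constructor
      · intro c _
        have hpw : List.Pairwise (fun s t : Int × Int × List Char => s.2.1 < t.2.1)
            ((ws.zipIdx).map F) := by
          rw [List.pairwise_map]
          refine (pvZipIdxPairwise ws 0).imp ?_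
          intro a b h
          simp only [hF]
          exact_mod_cast h
        refine List.Pairwise.imp_of_mem ?_ (hpw.filter _)
        intro a b ha hb hab
        have ha1 : a.1 = c := by simpa using (List.mem_filter.mp ha).2
        have hb1 : b.1 = c := by simpa using (List.mem_filter.mp hb).2
        exact Prod.Lex.toLex_lt_toLex.mpr (Or.inr ⟨ha1.trans hb1.symm, hab⟩)
      · refine hKSlt.imp_of_mem ?_
        intro c1 c2 _ _ hlt x hx y hy
        have hx1 : x.1 = c1 := by simpa using (List.mem_filter.mp hx).2
        have hy1 : y.1 = c2 := by simpa using (List.mem_filter.mp hy).2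
        exact Prod.Lex.toLex_lt_toLex.mpr (Or.inl (by rw [hx1, hy1]; exact hlt))
  have hout : List.foldl (fun acc k => acc ++ buckets.getD k []) [] KS
      = (KS.flatMap (fun c => ((ws.zipIdx).map F).filter (fun t => t.1 == c))).map
          (fun t => t.2.2) := by
    rw [PySem.List.foldl_append_eq_flatMap, List.nil_append, List.map_flatMap]
    refine congrArg (fun f => List.flatMap f KS) (funext fun c => ?_)
    rw [hbucket c, List.filter_map, List.map_map]
    exact (pvZipFilterMap ws 0 (fun w => (w.length : Int) == c) PySem.Chars.lower).symm
  rw [harr, hsort, hout]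
  generalize KS.flatMap (fun c => ((ws.zipIdx).map F).filter (fun t => t.1 == c)) = resl
  cases resl with
  | nil => simp [PySem.List.enumerate, PySem.Chars.join_nil]
  | cons t ts =>
    rw [pvJoinFold ((t.1, t.2.1, pvA_cap t.2.2) :: ts) _ 0 [] (by simp), List.nil_append]
    simp only [List.map_cons]
    rfl

-- ===== VERDICT (by name: the statement is the Claim_ definition above) =====
theorem arrangeWords_spec : Claim_equal_arrangeWords := by
  intro text _ _
  show arrangeWords text = arrangeWords_alt text
  unfold arrangeWords arrangeWords_alt
  exact congrArg String.mk (pvMain (PySem.Chars.splitOn text.toList [' ']))
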